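-- pv_equiv track=rewrite | github.com/acm-uga/archive | 2019-02-11/counting.py | next_value
-- ===== SOURCE A (Python) =====
-- def next_value(num, base):
--     '''Get the next number in the given base.
--
--     Arguments:
--         num (list of non-negative int):
--             The number in list form.
--         base (non-negative int):
--             The base of the number. Must be 2 or greater.
--
--     Returns:
--         The next number in list form. The number will have the same number of
--         digits. This function wraps around to 0 when it reaches the maximum
--         value for the given number of digits.
--     '''
--     num = num.copy()
--     max_digit = base - 1
--
--     if num == []:
--         return []
--
--     if num[-1] == max_digit:
--         num[:-1] = next_value(num[:-1], base)
--         num[-1] = 0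
--     else:
--         num[-1] = num[-1] + 1
--
--     return num
-- ===== SOURCE B (Python) =====
-- def next_value(num, base):
--     out = list(num)
--     for i in range(len(out) - 1, -1, -1):
--         if out[i] == base - 1:
--             out[i] = 0
--         else:
--             out[i] += 1
--             return out
--     return out
-- ===== Notes on version B (the rewrite author's own statement) =====
-- stated objective: alternative
-- what changed: Replaced the recursion that copies and re-slices the prefix at every carry with a single right-to-left carry loop over one copy that stops at the first non-carrying digit; measured about the same speed on random inputs (A is quadratic only when many trailing digits carry).
import Mathlib
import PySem

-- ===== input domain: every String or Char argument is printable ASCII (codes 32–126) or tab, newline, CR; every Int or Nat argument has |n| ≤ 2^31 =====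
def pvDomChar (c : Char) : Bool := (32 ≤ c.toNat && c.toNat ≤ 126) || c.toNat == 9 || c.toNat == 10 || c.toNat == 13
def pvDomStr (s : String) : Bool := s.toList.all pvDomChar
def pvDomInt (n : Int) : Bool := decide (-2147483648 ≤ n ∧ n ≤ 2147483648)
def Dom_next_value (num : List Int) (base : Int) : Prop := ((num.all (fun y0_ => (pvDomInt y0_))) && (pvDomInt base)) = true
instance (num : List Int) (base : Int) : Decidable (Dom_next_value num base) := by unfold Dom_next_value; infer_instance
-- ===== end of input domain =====

-- ===== PORT A =====
-- B replaces A's slice-copying recursion by one right-to-left carry pass over a single copy.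
-- A recurses on num[:-1]; ported as well-founded recursion on dropLast.
def next_value (num : List Int) (base : Int) : List Int :=
  if h : num = [] then []
  else if num.getLast h = base - 1 then
    next_value num.dropLast base ++ [0]
  else
    num.dropLast ++ [num.getLast h + 1]
termination_by num.length
decreasing_by
  simp only [List.length_dropLast]
  have := List.length_pos_iff.mpr h
  omega

-- ===== PORT B =====
-- B scans from the least-significant digit: zero each digit equal to base-1,
-- increment the first other digit and keep the rest unchanged (early return).
def nvCarry (base : Int) : List Int → List Int
  | [] => []
  | d :: rest => if d = base - 1 then 0 :: nvCarry base rest else (d + 1) :: rest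

def next_value_alt (num : List Int) (base : Int) : List Int :=
  (nvCarry base num.reverse).reverse

-- ===== PRECONDITION & SPEC =====
def Spec_next_value (num : List Int) (base : Int) (out : List Int) : Prop := out = next_value_alt num base
instance (num : List Int) (base : Int) (out : List Int) : Decidable (Spec_next_value num base out) := by unfold Spec_next_value; infer_instance

-- ===== CLAIM (what is proved, stated in full; the proofs are below) =====
def Claim_equal_next_value : Prop := ∀ (num : List Int) (base : Int), Dom_next_value num base → Spec_next_value num base (next_value num base)

-- ===== LEMMAS AND PROOFS =====

theorem nv_rev (base : Int) : ∀ (r : List Int),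
    next_value r.reverse base = (nvCarry base r).reverse := by
  intro r
  induction r with
  | nil => rw [next_value.eq_def]; simp [nvCarry]
  | cons d rest ih =>
    have hne : rest.reverse ++ [d] ≠ [] := by simp
    rw [List.reverse_cons, next_value.eq_def]
    simp only [hne, dite_false, List.getLast_append, List.dropLast_concat]
    by_cases hd : d = base - 1
    · simp [hd, nvCarry, ih]
    · simp [hd, nvCarry]

-- ===== VERDICT (by name: the statement is the Claim_ definition above) =====
theorem next_value_spec : Claim_equal_next_value := by
  intro num base _
  unfold Spec_next_value next_value_alt
  have := nv_rev base num.reverse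
  simpa using this
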